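-- pv_equiv track=rewrite | github.com/ericzhang98/competitive | codejam/kickstart_2022/round_b/b.py | solution
-- ===== SOURCE A (Python) =====
-- import math
--
-- def solution(x):
--     cnt = 0
--     for factor in range(1, int(math.sqrt(x)) + 1):
--         if x % factor == 0:
--             if str(factor) == str(factor)[::-1]:
--                 cnt += 1
--             factor2 = x // factor
--             if factor != factor2 and str(factor2) == str(factor2)[::-1]:
--                 cnt += 1
--     return cnt
-- ===== SOURCE B (Python) =====
-- import math
--
-- def solution(x):
--     # factorize x, then generate all divisors from the prime factorization,
--     # then count the palindromic ones
--     if x < 1: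
--         return 0
--     divs = [1]
--     n = x
--     p = 2
--     while p * p <= n:
--         if n % p == 0:
--             e = 0
--             while n % p == 0:
--                 n //= p
--                 e += 1
--             divs = [d * p ** k for k in range(e + 1) for d in divs]
--         p += 1
--     if n > 1:
--         divs = divs + [d * n for d in divs]
--     return sum(1 for d in divs if str(d) == str(d)[::-1])
-- ===== Notes on version B (the rewrite author's own statement) =====
-- stated objective: alternative
-- what changed: B computes the answer by a different algorithm: it factorizes x into prime powers by trial division (stripping each found prime completely), generates the complete divisor list from that factorization by multiplying the accumulated divisors with the prime powers (doubling with the leftover prime if one remains), and finally counts the palindromic entries, instead of A's single scan to sqrt(x) that tests each factor/cofactor pair for palindromicity inline.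
import Mathlib
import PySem

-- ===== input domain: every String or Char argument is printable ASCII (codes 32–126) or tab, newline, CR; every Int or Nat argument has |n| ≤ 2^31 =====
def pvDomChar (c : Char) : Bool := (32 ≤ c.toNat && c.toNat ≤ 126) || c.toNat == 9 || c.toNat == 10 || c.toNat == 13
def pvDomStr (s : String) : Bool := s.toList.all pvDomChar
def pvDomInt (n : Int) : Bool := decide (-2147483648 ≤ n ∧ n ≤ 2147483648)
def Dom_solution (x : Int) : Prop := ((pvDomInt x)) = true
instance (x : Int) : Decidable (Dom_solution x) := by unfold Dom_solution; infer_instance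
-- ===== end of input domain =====

-- B replaces A's paired trial-division scan by a different algorithm: factorize x into prime
-- powers, generate the full divisor list from the factorization, then count palindromes;
-- objective: alternative (same asymptotic cost).

-- ===== PORT A =====
-- str(n) == str(n)[::-1]: PySem.Int.toChars n = str(n) as a char list, [::-1] = List.reverse (exact)
def pvIsPal (n : Int) : Bool := PySem.Int.toChars n == (PySem.Int.toChars n).reverse

-- int(math.sqrt(x)) is ported as Int.sqrt x: exact for 0 ≤ x ≤ 2^31 (the double sqrt is correctly
-- rounded and its error is far smaller than the gap to the next integer; checked against CPython).
def solution (x : Int) : Int :=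
  (PySem.List.pyRange 1 (Int.sqrt x + 1)).foldl
    (fun cnt factor =>
      if PySem.Int.mod x factor = 0 then
        let cnt := if pvIsPal factor then cnt + 1 else cnt
        let factor2 := PySem.Int.floordiv x factor
        if factor ≠ factor2 ∧ pvIsPal factor2 then cnt + 1 else cnt
      else cnt) 0

-- ===== PORT B =====
-- inner 'while n % p == 0: n //= p; e += 1' loop; fuel n.toNat suffices (n strictly decreases)
def pvInner (p : Int) : Nat → Int → Int → Int × Int
  | 0, e, n => (e, n)
  | fuel + 1, e, n =>
    if PySem.Int.mod n p = 0 then pvInner p fuel (e + 1) (PySem.Int.floordiv n p)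
    else (e, n)

-- outer 'while p * p <= n' trial-division loop, carrying the divisor list;
-- fuel (p increases each iteration, n never grows) — x.toNat + 2 always suffices
-- p ** k (k ≥ 0) is ported as p ^ k.toNat (exact for the nonnegative k produced by range)
def pvOuter : Nat → Int → Int → List Int → Int × List Int
  | 0, n, _, divs => (n, divs)
  | fuel + 1, n, p, divs =>
    if p * p ≤ n then
      if PySem.Int.mod n p = 0 then
        let r := pvInner p n.toNat 0 n
        pvOuter fuel r.2 (p + 1)
          ((PySem.List.pyRange 0 (r.1 + 1) 1).flatMap
            (fun k => divs.map (fun d => d * p ^ k.toNat)))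
      else pvOuter fuel n (p + 1) divs
    else (n, divs)

def solution_alt (x : Int) : Int :=
  if x < 1 then 0
  else
    let r := pvOuter (x.toNat + 2) x 2 [1]
    let divs := if 1 < r.1 then r.2 ++ r.2.map (fun d => d * r.1) else r.2
    divs.foldl (fun c d => if pvIsPal d then c + 1 else c) 0

-- ===== PRECONDITION & SPEC =====
-- math.sqrt raises ValueError on negative x in A; Pre_ excludes exactly those inputs.
def Pre_solution (x : Int) : Prop := 0 ≤ x
instance (x : Int) : Decidable (Pre_solution x) := by unfold Pre_solution; infer_instance
def pvWitness_solution : Int := 12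

def Spec_solution (x : Int) (out : Int) : Prop := out = solution_alt x
instance (x : Int) (out : Int) : Decidable (Spec_solution x out) := by unfold Spec_solution; infer_instance

-- ===== CLAIM (what is proved, stated in full; the proofs are below) =====
def Claim_equal_solution : Prop := ∀ (x : Int), Dom_solution x → Pre_solution x → Spec_solution x (solution x)

-- ===== LEMMAS AND PROOFS =====

-- ---- generic counting bridge ----
lemma pv_countP_eq_of_mem_iff {l₁ l₂ : List Int} (h₁ : l₁.Nodup) (h₂ : l₂.Nodup)
    (h : ∀ a, a ∈ l₁ ↔ a ∈ l₂) (q : Int → Bool) : l₁.countP q = l₂.countP q :=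
  ((List.perm_ext_iff_of_nodup h₁ h₂).mpr h).countP_eq q

-- ---- A-side: the loop body, the partial fold, and its invariant ----
def pvBodyA (x : Int) (cnt factor : Int) : Int :=
  if PySem.Int.mod x factor = 0 then
    let cnt := if pvIsPal factor then cnt + 1 else cnt
    let factor2 := PySem.Int.floordiv x factor
    if factor ≠ factor2 ∧ pvIsPal factor2 then cnt + 1 else cnt
  else cnt

-- the list of divisors discovered by A's loop after steps 1..n (ghost structure for the proof)
def pvSetF (x : Int) (n : Nat) : PySem.Set Int :=
  (PySem.List.pyRange 1 ((n : Int) + 1)).foldl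
    (fun s f => if PySem.Int.mod x f = 0
      then PySem.Set.add (PySem.Set.add s f) (PySem.Int.floordiv x f) else s)
    PySem.Set.empty

def pvCntF (x : Int) (n : Nat) : Int :=
  (PySem.List.pyRange 1 ((n : Int) + 1)).foldl (pvBodyA x) 0

lemma pv_sq_le (x f : Int) (hx : 0 ≤ x) (hf : 0 ≤ f) (h : f ≤ Int.sqrt x) : f * f ≤ x := by
  unfold Int.sqrt at h
  have h1 : f.toNat ≤ Nat.sqrt x.toNat := by omega
  have h2 : f.toNat * f.toNat ≤ x.toNat := Nat.le_sqrt.mp h1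
  have h3 : ((f.toNat * f.toNat : Nat) : Int) ≤ ((x.toNat : Nat) : Int) := by exact_mod_cast h2
  push_cast at h3
  rw [Int.toNat_of_nonneg hf, Int.toNat_of_nonneg hx] at h3
  exact h3

lemma pv_le_sqrt (x f : Int) (hx : 0 ≤ x) (hf : 0 ≤ f) (h : f * f ≤ x) : f ≤ Int.sqrt x := by
  unfold Int.sqrt
  have h1 : f.toNat * f.toNat ≤ x.toNat := by
    have : ((f.toNat * f.toNat : Nat) : Int) ≤ ((x.toNat : Nat) : Int) := by
      push_cast
      rw [Int.toNat_of_nonneg hf, Int.toNat_of_nonneg hx]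
      exact h
    exact_mod_cast this
  have h2 : f.toNat ≤ Nat.sqrt x.toNat := Nat.le_sqrt.mpr h1
  omega

lemma pv_sqrt_lt (x : Int) (hx : 0 ≤ x) : x < (Int.sqrt x + 1) * (Int.sqrt x + 1) := by
  unfold Int.sqrt
  have h := Nat.lt_succ_sqrt x.toNat
  have h' : ((x.toNat : Int)) < (((Nat.sqrt x.toNat).succ : Nat) : Int) * (((Nat.sqrt x.toNat).succ : Nat) : Int) := by
    exact_mod_cast h
  rw [Int.toNat_of_nonneg hx] at h'
  push_cast at h'
  exact h'

lemma pv_codiv_lt (x f f' : Int) (h1 : 1 ≤ f') (h2 : f' < f)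
    (hd : f ∣ x) (hd' : f' ∣ x) (hff : f ≤ x / f) : x / f < x / f' := by
  have e1 : x / f * f = x := Int.ediv_mul_cancel hd
  have e2 : x / f' * f' = x := Int.ediv_mul_cancel hd'
  have hu1 : 1 ≤ x / f := le_trans (by omega) hff
  by_contra hc
  push Not at hc
  nlinarith

lemma pv_inv (x : Int) (hx : 1 ≤ x) (n : Nat) (hn : (n : Int) ≤ Int.sqrt x) :
    (pvSetF x n).Nodup
    ∧ (∀ y, y ∈ pvSetF x n ↔ ∃ f : Int, 1 ≤ f ∧ f ≤ (n : Int) ∧ f ∣ x ∧ (y = f ∨ y = x / f))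
    ∧ (((pvSetF x n).countP pvIsPal : Int) = pvCntF x n) := by
  induction n with
  | zero =>
      refine ⟨?_, ?_, ?_⟩
      · simp [pvSetF, PySem.List.pyRange_one_eq_nil (le_refl (1:Int)), PySem.Set.empty]
      · intro y
        simp [pvSetF, PySem.List.pyRange_one_eq_nil (le_refl (1:Int)), PySem.Set.empty]
        intro f h1 h2
        omega
      · simp [pvSetF, pvCntF, PySem.List.pyRange_one_eq_nil (le_refl (1:Int)), PySem.Set.empty]
  | succ n ih =>
      have hn' : (n : Int) ≤ Int.sqrt x := by push_cast at hn ⊢; omega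
      obtain ⟨hnd, hmem, hcnt⟩ := ih hn'
      have hsplit : PySem.List.pyRange 1 (((n + 1 : Nat) : Int) + 1) 1
          = PySem.List.pyRange 1 ((n : Int) + 1) 1 ++ [(n : Int) + 1] := by
        push_cast
        exact PySem.List.pyRange_one_succ_right (by omega)
      have hS : pvSetF x (n + 1)
          = (if PySem.Int.mod x ((n : Int) + 1) = 0
              then PySem.Set.add (PySem.Set.add (pvSetF x n) ((n : Int) + 1))
                     (PySem.Int.floordiv x ((n : Int) + 1))
              else pvSetF x n) := by
        unfold pvSetF; rw [hsplit, List.foldl_append]; rfl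
      have hC : pvCntF x (n + 1) = pvBodyA x (pvCntF x n) ((n : Int) + 1) := by
        unfold pvCntF; rw [hsplit, List.foldl_append]; rfl
      set f : Int := (n : Int) + 1 with hfdef
      by_cases hdvd : PySem.Int.mod x f = 0
      · -- divisor case
        have hfpos : 0 < f := by omega
        have hdv : f ∣ x := (PySem.Int.mod_eq_zero_iff_dvd x f).mp hdvd
        have hfd : PySem.Int.floordiv x f = x / f := PySem.Int.floordiv_eq_ediv_of_pos hfpos
        have hfsq : f ≤ Int.sqrt x := by push_cast at hn; omega
        have hffle : f ≤ x / f :=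
          (Int.le_ediv_iff_mul_le hfpos).mpr (pv_sq_le x f (by omega) (by omega) hfsq)
        -- freshness
        have hfresh : ∀ y ∈ pvSetF x n, y < f ∨ x / f < y := by
          intro y hy
          obtain ⟨f', h1, h2, h3, h4⟩ := (hmem y).mp hy
          rcases h4 with rfl | rfl
          · left; omega
          · right; exact pv_codiv_lt x f f' h1 (by omega) hdv h3 hffle
        have hfnot : f ∉ pvSetF x n := by
          intro hy; rcases hfresh f hy with h | h <;> omega
        have hcnot : x / f ∉ pvSetF x n := by
          intro hy; rcases hfresh (x / f) hy with h | h <;> omega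
        have hadd1 : PySem.Set.add (pvSetF x n) f = pvSetF x n ++ [f] := by
          simp [PySem.Set.add, PySem.Set.contains, hfnot]
        -- the new memberships, in one statement
        have hiff : ∀ y, (y ∈ pvSetF x n ∨ y = f ∨ y = x / f)
            ↔ ∃ f' : Int, 1 ≤ f' ∧ f' ≤ ((n + 1 : Nat) : Int) ∧ f' ∣ x ∧ (y = f' ∨ y = x / f') := by
          intro y
          constructor
          · rintro (hy | rfl | rfl)
            · obtain ⟨f', h1, h2, h3, h4⟩ := (hmem y).mp hy
              exact ⟨f', h1, by push_cast; omega, h3, h4⟩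
            · exact ⟨f, by omega, by push_cast; omega, hdv, Or.inl rfl⟩
            · exact ⟨f, by omega, by push_cast; omega, hdv, Or.inr rfl⟩
          · rintro ⟨f', h1, h2, h3, h4⟩
            by_cases hle : f' ≤ (n : Int)
            · exact Or.inl ((hmem y).mpr ⟨f', h1, hle, h3, h4⟩)
            · have : f' = f := by push_cast at h2; omega
              subst this
              rcases h4 with rfl | rfl
              · exact Or.inr (Or.inl rfl)
              · exact Or.inr (Or.inr rfl)
        by_cases hcf : x / f = f
        · -- perfect square: cofactor equals the factor
          have hS' : pvSetF x (n + 1) = pvSetF x n ++ [f] := by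
            rw [hS, if_pos hdvd, hfd, hadd1, hcf]
            simp [PySem.Set.add, PySem.Set.contains]
          refine ⟨?_, ?_, ?_⟩
          · rw [hS']
            refine List.Nodup.append hnd (List.nodup_singleton f) ?_
            intro a ha hb
            simp at hb
            exact hfnot (hb ▸ ha)
          · intro y
            rw [hS', ← hiff y]
            simp [hcf]
          · rw [hS', hC]
            unfold pvBodyA
            rw [if_pos hdvd, hfd]
            simp only [List.countP_append, List.countP_singleton, hcf]
            have hne : ¬ (f ≠ f ∧ pvIsPal f = true) := by simp
            rw [if_neg hne]
            by_cases hp : pvIsPal f <;>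
              simp only [hp, if_true, if_false, Bool.false_eq_true] <;>
              push_cast <;> omega
        · -- two new divisors
          have hS' : pvSetF x (n + 1) = pvSetF x n ++ [f] ++ [x / f] := by
            rw [hS, if_pos hdvd, hfd, hadd1]
            simp [PySem.Set.add, PySem.Set.contains]
            exact ⟨hcnot, hcf⟩
          refine ⟨?_, ?_, ?_⟩
          · rw [hS']
            refine List.Nodup.append (List.Nodup.append hnd (List.nodup_singleton f) ?_)
              (List.nodup_singleton _) ?_
            · intro a ha hb
              simp at hb
              exact hfnot (hb ▸ ha)
            · intro a ha hb
              simp at hb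
              subst hb
              rcases List.mem_append.mp ha with h | h
              · exact hcnot h
              · simp at h
                exact hcf h
          · intro y
            rw [hS', ← hiff y]
            simp
          · rw [hS', hC]
            unfold pvBodyA
            rw [if_pos hdvd, hfd]
            have hcf' : ¬ f = x / f := fun he => hcf he.symm
            simp only [List.countP_append, List.countP_singleton]
            by_cases hp : pvIsPal f <;> by_cases hq : pvIsPal (x / f) <;>
              simp only [hp, hq, hcf', ne_eq, not_false_iff, true_and,
                if_true, if_false, Bool.false_eq_true] <;>
              push_cast <;> omega
      · -- non-divisor: nothing changes
        have hS' : pvSetF x (n + 1) = pvSetF x n := by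
          rw [hS, if_neg hdvd]
        have hC' : pvCntF x (n + 1) = pvCntF x n := by
          rw [hC]; unfold pvBodyA; rw [if_neg hdvd]
        rw [hS', hC']
        refine ⟨hnd, fun y => ?_, hcnt⟩
        rw [hmem y]
        constructor
        · rintro ⟨f', h1, h2, h3, h4⟩
          exact ⟨f', h1, by push_cast; omega, h3, h4⟩
        · rintro ⟨f', h1, h2, h3, h4⟩
          refine ⟨f', h1, ?_, h3, h4⟩
          by_cases hle : f' ≤ (n : Int)
          · exact hle
          · have : f' = f := by push_cast at h2; omega
            subst this
            exact absurd ((PySem.Int.mod_eq_zero_iff_dvd x f).mpr h3) hdvd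

-- A's loop counts exactly the palindromic members of the divisor list it discovers,
-- and that list is exactly the positive divisors of x
lemma pv_setF_char (x : Int) (hx : 1 ≤ x) (y : Int) :
    y ∈ pvSetF x (Int.sqrt x).toNat ↔ 1 ≤ y ∧ y ∣ x := by
  have hs0 : 0 ≤ Int.sqrt x := Int.sqrt_nonneg x
  have hNc : (((Int.sqrt x).toNat : Nat) : Int) = Int.sqrt x := Int.toNat_of_nonneg hs0
  obtain ⟨-, hmem, -⟩ := pv_inv x hx (Int.sqrt x).toNat (by rw [hNc])
  rw [hmem y, hNc]
  constructor
  · rintro ⟨f, h1, h2, h3, rfl | rfl⟩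
    · exact ⟨h1, h3⟩
    · have he : x / f * f = x := Int.ediv_mul_cancel h3
      have hpos : 1 ≤ x / f := by
        by_cases h : 1 ≤ x / f
        · exact h
        · push Not at h
          nlinarith
      exact ⟨hpos, ⟨f, he.symm⟩⟩
  · rintro ⟨h1, h2⟩
    by_cases hle : y ≤ Int.sqrt x
    · exact ⟨y, h1, hle, h2, Or.inl rfl⟩
    · push Not at hle
      obtain ⟨c, hc⟩ := h2
      have hy0 : 0 < y := by omega
      have hc1 : 1 ≤ c := by
        by_cases h : 1 ≤ c
        · exact h
        · push Not at h
          nlinarith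
      have hcsq : c ≤ Int.sqrt x := by
        apply pv_le_sqrt x c (by omega) (by omega)
        by_contra hcc
        push Not at hcc
        have h2' : Int.sqrt x + 1 ≤ c := by
          by_contra hcl
          push Not at hcl
          have hcs : c ≤ Int.sqrt x := by omega
          have := pv_sq_le x c (by omega) (by omega) hcs
          omega
        have hgt := pv_sqrt_lt x (by omega)
        nlinarith
      have hne : c ≠ 0 := by omega
      refine ⟨c, hc1, hcsq, ⟨y, by linarith⟩, Or.inr ?_⟩
      rw [hc, Int.mul_ediv_cancel _ hne]

-- ---- B-side: specs for the two loops ----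
-- "k is a divisor of n in [2, p)" is impossible
def pvNoSmall (n p : Int) : Prop := ∀ k : Int, 2 ≤ k → k < p → ¬ k ∣ n
-- every divisor ≥ 2 of P has a divisor in [2, p)  ("all prime factors of P are < p")
def pvFacBelow (P p : Int) : Prop := ∀ k : Int, 2 ≤ k → k ∣ P → ∃ j : Int, 2 ≤ j ∧ j < p ∧ j ∣ k
-- p has no divisor in [2, p): together with 2 ≤ p this is primality
def pvOnlyTrivial (p : Int) : Prop := ∀ k : Int, 2 ≤ k → k < p → ¬ k ∣ p
-- l is exactly the positive divisors of P, without repetition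
def pvDivsOf (P : Int) (l : List Int) : Prop := l.Nodup ∧ ∀ d, d ∈ l ↔ 1 ≤ d ∧ d ∣ P

lemma pv_prime_of_noSmall (n p : Int) (hp : 2 ≤ p) (hd : p ∣ n) (h : pvNoSmall n p) :
    pvOnlyTrivial p := by
  intro k h2 hk hdk
  exact h k h2 hk (hdk.trans hd)

-- unique p-power decomposition of a positive divisor of P * p^e  (p "prime", p ∤ P)
lemma pv_dvd_mul_pow (p : Int) (hp2 : 2 ≤ p) (hpr : pvOnlyTrivial p)
    (P : Int) (hP : 1 ≤ P) (hpP : ¬ p ∣ P) (e : Nat) (d : Int) (hd1 : 1 ≤ d) :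
    d ∣ P * p ^ e ↔ ∃ k : Nat, k ≤ e ∧ ∃ a : Int, 1 ≤ a ∧ a ∣ P ∧ d = a * p ^ k := by
  constructor
  · intro hdvd
    induction e generalizing d with
    | zero =>
        refine ⟨0, le_refl 0, d, hd1, ?_, by simp⟩
        simpa using hdvd
    | succ e ih =>
        by_cases hpd : p ∣ d
        · obtain ⟨d', rfl⟩ := hpd
          have hd1' : 1 ≤ d' := by nlinarith
          have hstep : d' ∣ P * p ^ e := by
            have h2 : p * d' ∣ p * (P * p ^ e) := by
              have : P * p ^ (e + 1) = p * (P * p ^ e) := by ring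
              rw [← this]
              exact hdvd
            exact (mul_dvd_mul_iff_left (by omega : p ≠ 0)).mp h2
          obtain ⟨k, hk, a, ha1, haP, hrep⟩ := ih d' hd1' hstep
          exact ⟨k + 1, by omega, a, ha1, haP, by rw [hrep]; ring⟩
        · have hg : Int.gcd d p = 1 := by
            set g := Int.gcd d p with hg
            have hgp : (g : Int) ∣ p := Int.gcd_dvd_right d p
            have hgd : (g : Int) ∣ d := Int.gcd_dvd_left d p
            have hg0 : g ≠ 0 := by
              intro h0
              rw [h0] at hgp
              have := Int.gcd_eq_zero_iff.mp h0
              omega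
            by_contra hne
            have hg2 : 2 ≤ (g : Int) := by omega
            have hgle : (g : Int) ≤ p := Int.le_of_dvd (by omega) hgp
            rcases eq_or_lt_of_le hgle with heq | hlt
            · rw [heq] at hgd
              exact hpd hgd
            · exact hpr (g : Int) hg2 hlt hgp
          have hco : IsCoprime d (p ^ (e + 1)) :=
            (Int.isCoprime_iff_gcd_eq_one.mpr hg).pow_right
          exact ⟨0, by omega, d, hd1, hco.dvd_of_dvd_mul_right hdvd, by simp⟩
  · rintro ⟨k, hk, a, ha1, haP, rfl⟩
    exact mul_dvd_mul haP (pow_dvd_pow p hk)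

lemma pv_rep_unique_aux (p : Int) (hp2 : 2 ≤ p) (P : Int) (hpP : ¬ p ∣ P)
    (a a' : Int) (k k' : Nat) (ha : a ∣ P) (hkk : k ≤ k')
    (h : a * p ^ k = a' * p ^ k') : k = k' ∧ a = a' := by
  have hppos : (0 : Int) < p ^ k := pow_pos (by omega) k
  have hsplit : a' * p ^ k' = (a' * p ^ (k' - k)) * p ^ k := by
    rw [mul_assoc, ← pow_add]
    congr 2
    omega
  have ha4 : a = a' * p ^ (k' - k) :=
    mul_right_cancel₀ (by omega : (p : Int) ^ k ≠ 0) (h.trans hsplit)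
  by_cases hk : k = k'
  · subst hk
    simp at ha4
    exact ⟨rfl, ha4⟩
  · exfalso
    have hpa : p ∣ a := by
      rw [ha4]
      exact Dvd.dvd.mul_left (dvd_pow_self p (by omega : k' - k ≠ 0)) a'
    exact hpP (hpa.trans ha)

lemma pv_rep_unique (p : Int) (hp2 : 2 ≤ p) (P : Int) (hpP : ¬ p ∣ P)
    (a a' : Int) (k k' : Nat) (ha : a ∣ P) (ha' : a' ∣ P) (ha1 : 1 ≤ a) (ha1' : 1 ≤ a')
    (h : a * p ^ k = a' * p ^ k') : k = k' ∧ a = a' := by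
  rcases Nat.le_total k k' with hkk | hkk
  · exact pv_rep_unique_aux p hp2 P hpP a a' k k' ha hkk h
  · obtain ⟨h1, h2⟩ := pv_rep_unique_aux p hp2 P hpP a' a k' k ha' hkk h.symm
    exact ⟨h1.symm, h2.symm⟩

lemma pv_merge (p : Int) (hp2 : 2 ≤ p) (hpr : pvOnlyTrivial p)
    (P : Int) (hP : 1 ≤ P) (hpP : ¬ p ∣ P) (e : Nat) (divs : List Int)
    (hdivs : pvDivsOf P divs) :
    pvDivsOf (P * p ^ e)
      ((PySem.List.pyRange 0 ((e : Int) + 1) 1).flatMap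
        (fun k => divs.map (fun d => d * p ^ k.toNat))) := by
  obtain ⟨hnd, hmem⟩ := hdivs
  constructor
  · rw [List.nodup_flatMap]
    constructor
    · intro k hk
      refine hnd.map ?_
      intro a b hab
      exact mul_right_cancel₀ (pow_ne_zero _ (by omega : p ≠ 0)) hab
    · refine List.Pairwise.imp_of_mem ?_ (PySem.List.pairwise_lt_pyRange_one 0 ((e : Int) + 1))
      intro k k' hkmem hk'mem hlt y hy hy'
      have hk0 : 0 ≤ k := (PySem.List.mem_pyRange_one.mp hkmem).1
      obtain ⟨d, hd, rfl⟩ := List.mem_map.mp hy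
      obtain ⟨d', hd', he'⟩ := List.mem_map.mp hy'
      obtain ⟨hd1, hdP⟩ := (hmem d).mp hd
      obtain ⟨hd1', hdP'⟩ := (hmem d').mp hd'
      obtain ⟨hkk, -⟩ := pv_rep_unique p hp2 P hpP d' d k'.toNat k.toNat hdP' hdP hd1' hd1 he'
      omega
  · intro y
    rw [List.mem_flatMap]
    constructor
    · rintro ⟨k, hk, hy⟩
      obtain ⟨d, hd, rfl⟩ := List.mem_map.mp hy
      obtain ⟨hd1, hdP⟩ := (hmem d).mp hd
      obtain ⟨hk0, hklt⟩ := PySem.List.mem_pyRange_one.mp hk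
      have hkle : k.toNat ≤ e := by omega
      have hppow : (0 : Int) < p ^ k.toNat := pow_pos (by omega) _
      refine ⟨by nlinarith, ?_⟩
      exact (pv_dvd_mul_pow p hp2 hpr P hP hpP e _ (by nlinarith)).mpr
        ⟨k.toNat, hkle, d, hd1, hdP, rfl⟩
    · rintro ⟨hy1, hyd⟩
      obtain ⟨k, hk, a, ha1, haP, rfl⟩ :=
        (pv_dvd_mul_pow p hp2 hpr P hP hpP e y hy1).mp hyd
      refine ⟨(k : Int), PySem.List.mem_pyRange_one.mpr (by omega), ?_⟩
      refine List.mem_map.mpr ⟨a, (hmem a).mpr ⟨ha1, haP⟩, by simp⟩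

-- the trailing 'if n > 1' merge: the leftover n is prime here, so the divisors double
lemma pv_final_merge (q : Int) (hq2 : 2 ≤ q) (hqr : pvOnlyTrivial q) (P : Int) (hP : 1 ≤ P)
    (hqP : ¬ q ∣ P) (l : List Int) (h : pvDivsOf P l) :
    pvDivsOf (P * q) (l ++ l.map (fun d => d * q)) := by
  obtain ⟨hnd, hmem⟩ := h
  have hq1 : q ^ 1 = q := pow_one q
  constructor
  · refine List.Nodup.append hnd (hnd.map ?_) ?_
    · intro a b hab
      exact mul_right_cancel₀ (by omega : q ≠ 0) hab
    · intro y hy hy'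
      obtain ⟨hd1, hdP⟩ := (hmem y).mp hy
      obtain ⟨d, hd, rfl⟩ := List.mem_map.mp hy'
      obtain ⟨hd1', hdP'⟩ := (hmem d).mp hd
      have : q ∣ P := (Dvd.dvd.mul_left dvd_rfl d).trans hdP
      exact hqP this
  · intro y
    rw [List.mem_append, List.mem_map]
    constructor
    · rintro (hy | ⟨d, hd, rfl⟩)
      · obtain ⟨hd1, hdP⟩ := (hmem y).mp hy
        exact ⟨hd1, hdP.trans (Dvd.intro q rfl)⟩
      · obtain ⟨hd1, hdP⟩ := (hmem d).mp hd
        exact ⟨by nlinarith, mul_dvd_mul hdP dvd_rfl⟩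
    · rintro ⟨hy1, hyd⟩
      rw [← hq1] at hyd
      obtain ⟨k, hk, a, ha1, haP, rfl⟩ :=
        (pv_dvd_mul_pow q hq2 hqr P hP hqP 1 y hy1).mp hyd
      interval_cases k
      · exact Or.inl ((hmem _).mpr ⟨by simpa using ha1, by simpa using haP⟩)
      · exact Or.inr ⟨a, (hmem a).mpr ⟨ha1, haP⟩, by rw [hq1]⟩

lemma pv_inner_spec (p : Int) (hp : 2 ≤ p) :
    ∀ (fuel : Nat) (e n : Int), 1 ≤ n → n.toNat ≤ fuel →
    ∃ (k : Nat) (n' : Int), pvInner p fuel e n = (e + (k : Int), n')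
      ∧ n = n' * p ^ k ∧ ¬ p ∣ n' ∧ 1 ≤ n' := by
  intro fuel
  induction fuel with
  | zero =>
      intro e n h1 hf
      omega
  | succ fuel ih =>
      intro e n h1 hf
      by_cases hmod : PySem.Int.mod n p = 0
      · have hd : p ∣ n := (PySem.Int.mod_eq_zero_iff_dvd n p).mp hmod
        have hfd : PySem.Int.floordiv n p = n / p := PySem.Int.floordiv_eq_ediv_of_pos (by omega)
        have hm : n / p * p = n := Int.ediv_mul_cancel hd
        have hnp : p ≤ n := Int.le_of_dvd (by omega) hd
        have h1' : 1 ≤ n / p := by nlinarith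
        have hlt : n / p < n := by nlinarith
        have hf' : (n / p).toNat ≤ fuel := by omega
        obtain ⟨k, n', heq, hfac, hnp', hn1'⟩ := ih (e + 1) (n / p) h1' hf'
        refine ⟨k + 1, n', ?_, ?_, hnp', hn1'⟩
        · show pvInner p (fuel + 1) e n = _
          unfold pvInner
          rw [if_pos hmod, hfd, heq]
          congr 1
          push_cast
          ring
        · rw [← hm, hfac]
          ring
      · refine ⟨0, n, ?_, by simp, ?_, h1⟩
        · show pvInner p (fuel + 1) e n = _
          unfold pvInner
          rw [if_neg hmod]
          simp
        · intro hd
          exact hmod ((PySem.Int.mod_eq_zero_iff_dvd n p).mpr hd)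

lemma pv_outer_spec :
    ∀ (fuel : Nat) (n p : Int) (divs : List Int) (P : Int),
    1 ≤ n → 2 ≤ p → 1 ≤ P → (n + 1 - p).toNat < fuel →
    pvNoSmall n p → pvFacBelow P p → pvDivsOf P divs →
    ∃ (n' : Int) (l : List Int) (P' : Int),
      pvOuter fuel n p divs = (n', l) ∧ 1 ≤ n' ∧ 1 ≤ P' ∧ P' * n' = P * n
      ∧ pvDivsOf P' l ∧ (n' = 1 ∨ (2 ≤ n' ∧ pvOnlyTrivial n' ∧ ¬ n' ∣ P')) := by
  intro fuel
  induction fuel with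
  | zero =>
      intro n p divs P h1 hp2 hP1 hfuel hsmall hbelow hdivs
      omega
  | succ fuel ih =>
      intro n p divs P h1 hp2 hP1 hfuel hsmall hbelow hdivs
      by_cases hpp : p * p ≤ n
      · have hppn : p ≤ n := by nlinarith
        by_cases hmod : PySem.Int.mod n p = 0
        · -- p divides n: strip it out, multiply the divisor list
          have hd : p ∣ n := (PySem.Int.mod_eq_zero_iff_dvd n p).mp hmod
          have hpr : pvOnlyTrivial p := pv_prime_of_noSmall n p hp2 hd hsmall
          have hpP : ¬ p ∣ P := by
            intro hpdP
            obtain ⟨j, hj2, hjp, hjdvd⟩ := hbelow p (by omega) hpdP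
            exact hpr j hj2 hjp hjdvd
          obtain ⟨k, n₂, heq, hfac, hpn2, hn21⟩ :=
            pv_inner_spec p hp2 n.toNat 0 n h1 (le_refl _)
          have hn2n : n₂ ≤ n := by
            have : (0 : Int) < p ^ k := pow_pos (by omega) k
            nlinarith
          have hres : pvOuter (fuel + 1) n p divs
              = pvOuter fuel n₂ (p + 1)
                  ((PySem.List.pyRange 0 ((k : Int) + 1) 1).flatMap
                    (fun j => divs.map (fun d => d * p ^ j.toNat))) := by
            show (if p * p ≤ n then _ else _) = _
            rw [if_pos hpp, if_pos hmod, heq]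
            norm_num
          have hmerge := pv_merge p hp2 hpr P hP1 hpP k divs hdivs
          obtain ⟨n', l, P', hres2, c1, c2, c3, c4, c5⟩ :=
            ih n₂ (p + 1)
              ((PySem.List.pyRange 0 ((k : Int) + 1) 1).flatMap
                (fun j => divs.map (fun d => d * p ^ j.toNat)))
              (P * p ^ k) hn21 (by omega) (by have hq := pow_pos (by omega : (0:Int) < p) k; nlinarith) (by omega)
              (by
                intro j hj2 hjlt hjdvd
                have hjn : j ∣ n := hjdvd.trans ⟨p ^ k, hfac⟩
                rcases lt_or_eq_of_le (by omega : j ≤ p) with hlt | heqj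
                · exact hsmall j hj2 hlt hjn
                · rw [heqj] at hjdvd
                  exact hpn2 hjdvd)
              (by
                intro d hd2 hddvd
                by_cases hpd : p ∣ d
                · exact ⟨p, hp2, by omega, hpd⟩
                · obtain ⟨j, hjk, a, ha1, haP, rfl⟩ :=
                    (pv_dvd_mul_pow p hp2 hpr P hP1 hpP k _ (by omega)).mp hddvd
                  have hj0 : j = 0 := by
                    by_contra hj
                    exact hpd (Dvd.dvd.mul_left (dvd_pow_self p hj) a)
                  rw [hj0] at hd2 ⊢
                  simp only [pow_zero, mul_one] at hd2 ⊢
                  obtain ⟨j', hj'2, hj'p, hj'd⟩ := hbelow a hd2 haP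
                  exact ⟨j', hj'2, by omega, hj'd⟩)
              hmerge
          refine ⟨n', l, P', hres.trans hres2, c1, c2, ?_, c4, c5⟩
          rw [c3, hfac]
          ring
        · -- p does not divide n: just advance p
          have hres : pvOuter (fuel + 1) n p divs = pvOuter fuel n (p + 1) divs := by
            show (if p * p ≤ n then _ else _) = _
            rw [if_pos hpp, if_neg hmod]
          obtain ⟨n', l, P', hres2, c1, c2, c3, c4, c5⟩ :=
            ih n (p + 1) divs P h1 (by omega) hP1 (by omega)
              (by
                intro j hj2 hjlt hjdvd
                rcases lt_or_eq_of_le (by omega : j ≤ p) with hlt | heqj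
                · exact hsmall j hj2 hlt hjdvd
                · rw [heqj] at hjdvd
                  exact hmod ((PySem.Int.mod_eq_zero_iff_dvd n p).mpr hjdvd))
              (by
                intro d hd2 hddvd
                obtain ⟨j, hj2, hjp, hjd⟩ := hbelow d hd2 hddvd
                exact ⟨j, hj2, by omega, hjd⟩)
              hdivs
          exact ⟨n', l, P', hres.trans hres2, c1, c2, c3, c4, c5⟩
      · -- loop exit: n is 1 or prime, and coprime to the accumulated part
        have hres : pvOuter (fuel + 1) n p divs = (n, divs) := by
          show (if p * p ≤ n then _ else _) = _
          rw [if_neg hpp]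
        refine ⟨n, divs, P, hres, h1, hP1, mul_comm P n ▸ rfl, hdivs, ?_⟩
        rcases eq_or_lt_of_le h1 with heq1 | h2
        · exact Or.inl heq1.symm
        · refine Or.inr ⟨h2, ?_, ?_⟩
          · intro j hj2 hjn hjd
            have hjp : p ≤ j := by
              by_contra hjp
              exact hsmall j hj2 (by omega) hjd
            obtain ⟨c, hc⟩ := hjd
            have hc1 : 1 ≤ c := by nlinarith
            rcases eq_or_lt_of_le hc1 with hc1' | hc2
            · rw [← hc1', mul_one] at hc
              omega
            · have hcn : c ∣ n := ⟨j, by rw [hc]; ring⟩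
              have hcp : p ≤ c := by
                by_contra hcp
                exact hsmall c (by omega) (by omega) hcn
              nlinarith
          · intro hnP
            obtain ⟨j, hj2, hjp, hjd⟩ := hbelow n (by omega) hnP
            exact hsmall j hj2 hjp hjd

-- ===== VERDICT (by name: the statement is the Claim_ definition above) =====
theorem solution_spec : Claim_equal_solution := by
  intro x _ hpre
  unfold Spec_solution
  unfold Pre_solution at hpre
  rcases eq_or_lt_of_le hpre with h0 | hx1
  · rw [← h0]
    decide
  · have hx : (1 : Int) ≤ x := hx1
    -- A's loop = palindrome count over the divisor list it discovers
    have hs0 : 0 ≤ Int.sqrt x := Int.sqrt_nonneg x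
    have hNc : (((Int.sqrt x).toNat : Nat) : Int) = Int.sqrt x := Int.toNat_of_nonneg hs0
    have hA : solution x = pvCntF x (Int.sqrt x).toNat := by
      unfold pvCntF pvBodyA
      rw [hNc]
      rfl
    obtain ⟨hAnd, -, hAcnt⟩ := pv_inv x hx (Int.sqrt x).toNat (by rw [hNc])
    -- B's loops produce the full positive divisor list of x
    obtain ⟨n', l, P', heq, hn1, hP1, hPn, hDiv, hcase⟩ :=
      pv_outer_spec (x.toNat + 2) x 2 [1] 1 hx (le_refl 2) (le_refl 1) (by omega)
        (by intro k h2 hk hd; omega)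
        (by intro k h2 hk; exact absurd (Int.le_of_dvd one_pos hk) (by omega))
        ⟨List.nodup_singleton 1, fun d => by
          simp only [List.mem_singleton]
          constructor
          · rintro rfl
            exact ⟨le_refl 1, dvd_rfl⟩
          · rintro ⟨h1, h2⟩
            exact Int.eq_one_of_dvd_one (by omega) h2⟩
    rw [one_mul] at hPn
    have hfinal : pvDivsOf x (if 1 < n' then l ++ l.map (fun d => d * n') else l) := by
      rcases hcase with rfl | ⟨h2, hOT, hnd⟩
      · rw [if_neg (by omega)]
        rw [mul_one] at hPn
        rw [hPn] at hDiv
        exact hDiv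
      · rw [if_pos (by omega)]
        have hm := pv_final_merge n' h2 hOT P' hP1 hnd l hDiv
        rw [hPn] at hm
        exact hm
    have hB : solution_alt x
        = ((if 1 < n' then l ++ l.map (fun d => d * n') else l).countP pvIsPal : Int) := by
      unfold solution_alt
      rw [if_neg (by omega)]
      simp only [heq]
      rw [PySem.List.foldl_if_add_one]
      simp
    obtain ⟨hBnd, hBmem⟩ := hfinal
    have hcnt := pv_countP_eq_of_mem_iff hAnd hBnd
      (fun a => by rw [pv_setF_char x hx a, hBmem a]) pvIsPal
    rw [hA, ← hAcnt, hB, hcnt]
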